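/- GENERATED by mk_final_copies.py from the proof of the farm's unit `vorbis_decode_packet_rest.5a` (farm:vorbis_decode_packet_rest.5a.1: Proof.lean) as the
   re-elaboration sweep compiled it — do not edit. -/
import Asan.CheckWalk
import Vorbis.Spec.Units.vorbis_decode_packet_rest_5a
open X86 X86.User Asan Vorbis Vorbis.Spec Vorbis.Spec.vorbis_decode_packet_rest

set_option maxRecDepth 40000
set_option maxHeartbeats 4000000

/-- **Segment .5a of `vorbis_decode_packet_rest`** (0x111000 – 0x11104a, lines 3264 – 3266): the EOP test `f->valid_bits ==
INVALID_BITS` (ONE check site, 0x111016: a field of `*f`, `Bits.site_field`) → segment .7 entry A (`At7a`); otherwise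
`step2_flag[0] = step2_flag[1] = 1` (constant indices into the own frame object: no check call), the spills `[0x38] = i`,
`[0x30] = map`, `j = 2` → the loop head 0x11109c with `AtNbLoop … i 2`. Both exits are closed by the family's carry lemma
`Stable.nb_carry` (Vorbis/Spec/PacketRest5.lean) against the three windows `nbWins`. -/
theorem Vorbis.Spec.Worked.vorbis_decode_packet_rest_5a_ok : Vorbis.Spec.vorbis_decode_packet_rest_5a.Statement := by
  intro Lay hLay μ hμ u₀ hcode hload4
  intro others frames len Ar stored room mode ysz e ret i v hat
  -- 1. the ENTRY state's facts
  have he := hat.entry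
  v_entry he
  -- 2. the present state (facts about `v` are NOT named `w_…`: the walker clears those after one step)
  have w_rip := hat.rip
  have c_rsp : v.reg .rsp = e.reg .rsp - 3000 := hat.rsp
  have w_eq : Mem.EqOn Vorbis.L.textLo Vorbis.L.textHi u₀.mem v.mem := hat.code
  have hdf : v.flags .df = false := (show abiInv _ from hat.abi).1
  have hmx : v.mxcsr &&& 0x1F80 = 0x1F80 := (show abiInv _ from hat.abi).2
  have hsse := Vorbis.sseOK_of_abiInv hat.abi
  -- the three slots the segment reads, at the addresses the walker asks for
  have s54 : v.mem.readLE (e.reg .rsp - 2916) 4 = i := by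
    rw [← hat.slot_i]
    show _ = v.mem.readLE _ 4
    congr 1
    u_omega
  have s58 : v.mem.readLE (e.reg .rsp - 2912) 8 = mapOf v.mem (fOf e) (mOf e) := by
    rw [← hat.slot_map]
    show _ = v.mem.readLE _ 8
    congr 1
    u_omega
  have s40 : v.mem.readLE (e.reg .rsp - 2936) 8 = fOf e := by
    rw [← hat.slot_f]
    show _ = v.mem.readLE _ 8
    congr 1
    u_omega
  -- where `*f` lies, over `(e.reg .rdi).toNat` (`fOf e` is an abbrev `u_omega` does not see through)
  obtain ⟨hf1, hf2⟩ : 0x400000 ≤ (e.reg .rdi).toNat ∧ (e.reg .rdi).toNat + 1808 ≤ 0xC00000 := by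
    have hr := hat.inv.fb.vorbis.bits.OBR
    simp only [voff] at hr
    exact hr
  have hi16 := hat.inv.config.header.HD1.2
  have hilt := hat.i_lt
  have e_i : Word.ofBV (BitVec.ofNat 32 i) = UInt64.ofNat i := by
    apply UInt64.toNat_inj.mp
    rw [Vorbis.toNat_ofBV32, Vorbis.Spec.toNat_ofNat32 _ (by omega),
      UInt64.toNat_ofNat_of_lt' (by unfold UInt64.size; omega)]
  -- 3. the walk
  u_walk hcode [hμ.vendor] until [Vorbis.L.vorbis_decode_packet_rest.cut10, Vorbis.L.vorbis_decode_packet_rest.cut14] span [Vorbis.L.textLo, Vorbis.L.textHi] side (v_side)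
  · -- 0x111016: the check of `f->valid_bits`, a field of `*f`
    have hun : ShadowUntouched v.mem s_111016.mem := by v_untouched
    have hs := hat.inv.fb.vorbis.bits.site_field hat.inv.live 1768 4 (by omega) (by omega) rfl
    exact Vorbis.Spec.check_site hat.shadow hun hs (by u_omega)
  · -- 0x111022 taken: `valid_bits = −1` → segment .7, entry A (0x1112b5)
    refine ReachVia.done (Or.inl ?_)
    have hsame : Mem.SameExcept (nbWins ysz e v.mem i) v.mem s_111022.mem := by
      unfold nbWins
      u_same
    have hun : ShadowUntouched v.mem s_111022.mem := by v_untouched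
    have habi : abiInv s_111022 := by v_inv
    obtain ⟨hst, hi', _, _, _, emap⟩ := Stable.nb_carry hat.toStable hat.i_lt hat.g w_rsp w_eq habi hsame hun
    refine { toStable := hst, rip := w_rip, r14 := ?_, i_lt := hi', r13 := ?_ }
    · rw [w_r14]
      exact e_i
    · rw [w_r13, emap, ← s58]
      exact UInt64.toNat_ofNat_of_lt (Mem.readLE_lt _ _ _)
  · -- 0x11104a: `step2_flag[0] = step2_flag[1] = 1`, `[0x38] = i`, `[0x30] = map`, `j = 2` → the loop head
    refine ReachVia.done (Or.inr ?_)
    have hsame : Mem.SameExcept (nbWins ysz e v.mem i) v.mem s_11104a.mem := by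
      unfold nbWins
      u_same
    have hun : ShadowUntouched v.mem s_11104a.mem := by v_untouched
    have habi : abiInv s_11104a := by v_inv
    have e15 : s_11104a.reg .r15 = v.reg .r15 := w_kept .r15 rfl
    obtain ⟨hst, hi', hg', hval, efy, emap⟩ := Stable.nb_carry hat.toStable hat.i_lt hat.g w_rsp w_eq habi hsame hun
    have hmaplt : mapOf v.mem (fOf e) (mOf e) < 2 ^ 64 := by
      rw [← s58]
      exact Mem.readLE_lt _ _ _
    -- the two spills just written, and the spill of `finalY` that no store of the segment meets
    have q1 : s_11104a.mem.readLE (e.reg .rsp - 2944) 4 = i := by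
      u_resolve
      rw [Vorbis.Spec.toNat_ofNat32 _ (by omega)]
      omega
    have q2 : s_11104a.mem.readLE (e.reg .rsp - 2952) 8 = mapOf v.mem (fOf e) (mOf e) := by
      u_resolve
      exact UInt64.toNat_ofNat_of_lt' (by unfold UInt64.size; omega)
    have q3 : s_11104a.mem.readLE (e.reg .rsp - 2968) 8 = v.mem.readLE (e.reg .rsp - 2968) 8 := by
      u_resolve
    have hfl := (hat.inv.config.floor.floor hat.g).values_bounds
    refine { toStable := hst, rip := w_rip, g := ?_, r13 := ?_, j_ge := Nat.le_refl _, j_le := ?_, slot_i := ?_, i_lt := hi',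
             slot_finalY := ?_, slot_map := ?_ }
    · rw [e15]
      exact hg'
    · rw [w_r13]
      rfl
    · rw [e15, hval]
      omega
    · show s_11104a.mem.readLE (e.reg .rsp - 3000 + 0x38) 4 = i
      rw [show e.reg .rsp - 3000 + 0x38 = e.reg .rsp - 2944 from by u_omega]
      exact q1
    · show s_11104a.mem.readLE (e.reg .rsp - 3000 + 0x20) 8 = _
      rw [efy, ← hat.slot_finalY]
      show _ = v.mem.readLE (e.reg .rsp - 3000 + 0x20) 8
      rw [show e.reg .rsp - 3000 + 0x20 = e.reg .rsp - 2968 from by u_omega]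
      exact q3
    · show s_11104a.mem.readLE (e.reg .rsp - 3000 + 0x30) 8 = _
      rw [show e.reg .rsp - 3000 + 0x30 = e.reg .rsp - 2952 from by u_omega, emap]
      exact q2
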